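-- pv_equiv track=rewrite | github.com/ottter/wordle-loser | wordle_loser.py | unique_vowels
-- ===== SOURCE A (Python) =====
-- def unique_vowels(word):
--     """Would be nice to get all the vowels out early"""
--     vowels = ['a', 'e', 'i', 'o', 'u']
--     unique_vowels = set()
--     for letter in word:
--         if letter in vowels:
--             unique_vowels.add(letter)
--     if len(unique_vowels) >= 2:
--         return len(unique_vowels)
--     return 0
-- ===== SOURCE B (Python) =====
-- def unique_vowels(word):
--     count = sum(1 for v in 'aeiou' if v in word)
--     return count if count >= 2 else 0
-- ===== Notes on version B (the rewrite author's own statement) =====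
-- stated objective: idiomatic
-- what changed: Instead of scanning the word letter by letter and accumulating seen vowels in a set, B iterates over the five-letter vowel alphabet and sums membership tests against the word, removing the accumulator set.
import Mathlib
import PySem

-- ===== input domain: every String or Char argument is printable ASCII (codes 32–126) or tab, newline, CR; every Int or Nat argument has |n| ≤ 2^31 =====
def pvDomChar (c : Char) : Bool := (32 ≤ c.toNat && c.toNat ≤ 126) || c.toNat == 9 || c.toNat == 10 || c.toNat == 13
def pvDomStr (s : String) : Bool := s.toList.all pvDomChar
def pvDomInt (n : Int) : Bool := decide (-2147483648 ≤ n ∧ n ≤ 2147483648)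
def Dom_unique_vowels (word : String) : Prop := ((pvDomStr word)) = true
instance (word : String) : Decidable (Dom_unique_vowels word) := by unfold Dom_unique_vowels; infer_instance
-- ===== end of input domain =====

-- B iterates the fixed vowel alphabet and counts membership in the word instead of
-- scanning the word and accumulating seen vowels in a set (idiomatic; measured faster by a constant factor: C-level substring membership vs a bytecode loop).

-- ===== PORT A =====
def unique_vowels (word : String) : Int :=
  let vowels : List Char := ['a', 'e', 'i', 'o', 'u']
  let uv : PySem.Set Char :=
    word.toList.foldl (fun s letter => if letter ∈ vowels then PySem.Set.add s letter else s)
      PySem.Set.empty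
  if PySem.Set.len uv ≥ 2 then PySem.Set.len uv else 0

-- ===== PORT B =====
def unique_vowels_alt (word : String) : Int :=
  let count : Int :=
    "aeiou".toList.foldl (fun n v => if v ∈ word.toList then n + 1 else n) 0
  if count ≥ 2 then count else 0

-- ===== PRECONDITION & SPEC =====
def Spec_unique_vowels (word : String) (out : Int) : Prop := out = unique_vowels_alt word
instance (word : String) (out : Int) : Decidable (Spec_unique_vowels word out) := by unfold Spec_unique_vowels; infer_instance

-- ===== CLAIM (what is proved, stated in full; the proofs are below) =====
def Claim_equal_unique_vowels : Prop := ∀ (word : String), Dom_unique_vowels word → Spec_unique_vowels word (unique_vowels word)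

-- ===== LEMMAS AND PROOFS =====

-- membership in A's accumulated set
theorem uv_fold_mem (vowels : List Char) (l : List Char) (s : PySem.Set Char) (c : Char) :
    c ∈ l.foldl (fun s letter => if letter ∈ vowels then PySem.Set.add s letter else s) s ↔
      c ∈ s ∨ (c ∈ vowels ∧ c ∈ l) := by
  induction l generalizing s with
  | nil => simp
  | cons x xs ih =>
    simp only [List.foldl_cons]
    split_ifs with hx
    · rw [ih]
      simp only [PySem.Set.mem_add, List.mem_cons]
      constructor
      · rintro ((h | rfl) | h) <;> tauto
      · rintro (h | ⟨hv, rfl | h⟩) <;> tauto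
    · rw [ih]
      simp only [List.mem_cons]
      constructor
      · rintro (h | h) <;> tauto
      · rintro (h | ⟨hv, rfl | h⟩) <;> tauto

-- A's accumulated set stays duplicate-free
theorem uv_fold_nodup (vowels : List Char) (l : List Char) (s : PySem.Set Char)
    (hs : s.Nodup) :
    (l.foldl (fun s letter => if letter ∈ vowels then PySem.Set.add s letter else s) s).Nodup := by
  induction l generalizing s with
  | nil => exact hs
  | cons x xs ih =>
    simp only [List.foldl_cons]
    split_ifs with hx
    · exact ih _ (PySem.Set.nodup_add _ _ hs)
    · exact ih _ hs

-- B's counting fold is the length of the filter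
theorem count_fold (w : List Char) (l : List Char) (n : Int) :
    l.foldl (fun n v => if v ∈ w then n + 1 else n) n =
      n + ((l.filter (fun v => decide (v ∈ w))).length : Int) := by
  induction l generalizing n with
  | nil => simp
  | cons x xs ih =>
    by_cases hx : x ∈ w <;>
      simp only [List.foldl_cons, List.filter_cons, hx, decide_true, decide_false,
        if_true, if_false, List.length_cons, ih] <;> push_cast <;> ring

theorem uv_len_eq (word : String) :
    (PySem.Set.len (word.toList.foldl
        (fun s letter => if letter ∈ (['a','e','i','o','u'] : List Char)
          then PySem.Set.add s letter else s) PySem.Set.empty) : Int) =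
      "aeiou".toList.foldl (fun n v => if v ∈ word.toList then n + 1 else n) 0 := by
  have hperm :
      (word.toList.foldl
        (fun s letter => if letter ∈ (['a','e','i','o','u'] : List Char)
          then PySem.Set.add s letter else s) PySem.Set.empty).Perm
      ((['a','e','i','o','u'] : List Char).filter (fun v => decide (v ∈ word.toList))) := by
    rw [List.perm_ext_iff_of_nodup]
    · intro c
      rw [uv_fold_mem]
      simp [PySem.Set.empty, List.mem_filter]
    · exact uv_fold_nodup _ _ _ (by simp [PySem.Set.empty])
    · exact List.Nodup.filter _ (by decide)
  rw [count_fold]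
  have h5 : "aeiou".toList = (['a','e','i','o','u'] : List Char) := by decide
  rw [h5]
  have hlen := hperm.length_eq
  unfold PySem.Set.len
  rw [hlen]
  ring

-- ===== VERDICT (by name: the statement is the Claim_ definition above) =====
theorem unique_vowels_spec : Claim_equal_unique_vowels := by
  intro word _
  unfold Spec_unique_vowels unique_vowels unique_vowels_alt
  simp only []
  rw [uv_len_eq]
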